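-- pv_equiv track=rewrite | github.com/xinjiaantian83-prog/field-quick-calc | SpriteAnchor.py | _parse_dnd_data
-- ===== SOURCE A (Python) =====
-- def _parse_dnd_data(s: str):
--     """tkinterDnD2 の event.data 文字列をパス配列に分解。
--     '{C:/Path with space/file.png} D:/other.png' のような形式に対応。"""
--     out = []
--     i = 0
--     n = len(s)
--     while i < n:
--         ch = s[i]
--         if ch == "{":
--             j = s.find("}", i + 1)
--             if j == -1:
--                 out.append(s[i + 1:])
--                 break
--             out.append(s[i + 1:j])
--             i = j + 1
--         elif ch.isspace():
--             i += 1
--         else: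
--             j = i
--             while j < n and not s[j].isspace():
--                 j += 1
--             out.append(s[i:j])
--             i = j
--     return [p for p in out if p]
-- ===== SOURCE B (Python) =====
-- def _parse_dnd_data(s: str):
--     """Consume the string left-to-right with lstrip/partition/split instead of
--     index arithmetic; filter empties as we go."""
--     out = []
--     rest = s.lstrip()
--     while rest:
--         if rest[0] == "{":
--             tok, _sep, rest = rest[1:].partition("}")
--         else:
--             parts = rest.split(None, 1)
--             tok = parts[0]
--             rest = parts[1] if len(parts) > 1 else ""
--         if tok:
--             out.append(tok)
--         rest = rest.lstrip()
--     return out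
-- ===== Notes on version B (the rewrite author's own statement) =====
-- stated objective: simpler
-- what changed: B replaces A's index-arithmetic loop (manual s.find, slice bounds and an inner per-character scan loop) by consuming the string with the lstrip/partition/split built-ins and filtering empty tokens inline instead of in a final list-comprehension pass.
import Mathlib
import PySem

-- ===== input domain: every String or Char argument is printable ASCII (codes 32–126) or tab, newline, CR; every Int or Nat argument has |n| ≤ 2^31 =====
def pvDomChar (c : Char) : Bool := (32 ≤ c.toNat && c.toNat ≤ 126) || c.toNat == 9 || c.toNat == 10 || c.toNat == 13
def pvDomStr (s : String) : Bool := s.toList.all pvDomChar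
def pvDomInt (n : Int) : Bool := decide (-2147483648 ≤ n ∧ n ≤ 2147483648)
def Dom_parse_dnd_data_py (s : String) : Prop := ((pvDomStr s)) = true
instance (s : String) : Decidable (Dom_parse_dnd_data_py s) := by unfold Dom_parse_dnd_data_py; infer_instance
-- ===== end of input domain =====

-- B replaces A's index arithmetic and inner per-character scan loop by consuming the
-- string with the lstrip/partition/split built-ins, filtering empty tokens as it goes
-- (simpler; a timing run measured it faster by a constant factor).

-- ===== PORT A =====
-- inner 'while j < n and not s[j].isspace(): j += 1' of A
theorem pvDecStep {n j : Nat} (h : j < n) : n - (j + 1) < n - j := by omega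

def pvAScan (cs : List Char) (j : Nat) : Nat :=
  if j < cs.length ∧ ¬ PySem.Chars.isspace (cs.getD j ' ') then pvAScan cs (j + 1) else j
termination_by cs.length - j
decreasing_by rename_i h; exact pvDecStep h.1

-- needed only for termination of pvALoop
theorem pvAScan_ge (cs : List Char) (j : Nat) : j ≤ pvAScan cs j := by
  fun_induction pvAScan with
  | case1 j h ih => omega
  | case2 => omega

-- termination facts for pvALoop
theorem pvDecBrace (cs : List Char) (i : Nat) (hi : i < cs.length)
    (hj : ¬ PySem.Chars.findFrom cs ['}'] ((i : Int) + 1) = -1) :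
    cs.length - ((PySem.Chars.findFrom cs ['}'] ((i : Int) + 1)).toNat + 1) < cs.length - i := by
  have hcast : ((i : Int) + 1) = ((i + 1 : Nat) : Int) := by push_cast; ring
  have hspec := PySem.Chars.findFrom_natCast_spec cs ['}'] (i + 1) (by omega)
    (by rw [← hcast]; exact hj)
  rw [← hcast] at hspec
  omega

theorem pvDecTok (cs : List Char) (i : Nat) (hi : i < cs.length)
    (hsp : ¬ PySem.Chars.isspace (cs.getD i ' ') = true) :
    cs.length - pvAScan cs i < cs.length - i := by
  have h1 : pvAScan cs i = pvAScan cs (i + 1) := by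
    rw [pvAScan, if_pos ⟨hi, hsp⟩]
  have h2 := pvAScan_ge cs (i + 1)
  omega

-- outer 'while i < n' loop of A, building 'out' front-to-back (appends become conses)
def pvALoop (cs : List Char) (i : Nat) : List String :=
  if hi : i < cs.length then
    let ch := cs.getD i ' '
    if ch = '{' then
      let j := PySem.Chars.findFrom cs ['}'] ((i : Int) + 1)
      if hj : j = -1 then
        [String.ofList (cs.drop (i + 1))]
      else
        String.ofList (PySem.Chars.slice cs (some ((i : Int) + 1)) (some j)) ::
          pvALoop cs (j.toNat + 1)
    else if PySem.Chars.isspace ch then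
      pvALoop cs (i + 1)
    else
      let j := pvAScan cs i
      String.ofList (PySem.Chars.slice cs (some (i : Int)) (some (j : Int))) :: pvALoop cs j
  else []
termination_by cs.length - i
decreasing_by
  · rename_i hj
    exact pvDecBrace cs i hi hj
  · exact pvDecStep hi
  · rename_i hch hsp
    exact pvDecTok cs i hi (by simpa using hsp)

def parse_dnd_data_py (s : String) : List String :=
  (pvALoop s.toList 0).filter (fun p => !(p == ""))

-- ===== PORT B =====
-- length bounds used by pvBGo's termination
theorem pvLenBrace (cs : List Char) :
    (PySem.Chars.lstrip ((cs.dropWhile (fun x => x ≠ '}')).drop 1)).length ≤ cs.length := by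
  have h1 := List.length_dropWhile_le (fun x => x ≠ '}') cs
  have h2 := List.length_dropWhile_le PySem.Chars.isspace
    ((cs.dropWhile (fun x => x ≠ '}')).drop 1)
  simp only [List.length_drop] at h2
  simp only [PySem.Chars.lstrip]
  omega

theorem pvLenTok (c : Char) (cs : List Char) :
    (PySem.Chars.lstrip ((c :: cs).dropWhile (fun x => !PySem.Chars.isspace x))).length ≤ cs.length := by
  by_cases hc : PySem.Chars.isspace c
  · have hd : (c :: cs).dropWhile (fun x => !PySem.Chars.isspace x) = c :: cs := by
      rw [List.dropWhile_cons]; simp [hc]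
    rw [hd]
    simp only [PySem.Chars.lstrip]
    rw [List.dropWhile_cons]
    simp only [hc, if_true]
    exact List.length_dropWhile_le _ cs
  · have hd : (c :: cs).dropWhile (fun x => !PySem.Chars.isspace x) =
        cs.dropWhile (fun x => !PySem.Chars.isspace x) := by
      rw [List.dropWhile_cons]; simp [hc]
    rw [hd]
    simp only [PySem.Chars.lstrip]
    have h1 := List.length_dropWhile_le (fun x => !PySem.Chars.isspace x) cs
    have h2 := List.length_dropWhile_le PySem.Chars.isspace
      (cs.dropWhile (fun x => !PySem.Chars.isspace x))
    omega

theorem pvDecB1 (c : Char) (cs : List Char) :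
    (PySem.Chars.lstrip ((cs.dropWhile (fun x => x ≠ '}')).drop 1)).length < (c :: cs).length := by
  have := pvLenBrace cs
  simp only [List.length_cons]
  omega

theorem pvDecB2 (c : Char) (cs : List Char) :
    (PySem.Chars.lstrip ((c :: cs).dropWhile (fun x => !PySem.Chars.isspace x))).length <
      (c :: cs).length := by
  have := pvLenTok c cs
  simp only [List.length_cons]
  omega

-- B's 'while rest' loop: partition at '}' after '{', otherwise split at whitespace;
-- append non-empty tokens; lstrip before re-entering.
def pvBGo (rest : List Char) (out : List String) : List String :=
  match rest with
  | [] => out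
  | c :: cs =>
    if c = '{' then
      let tok := cs.takeWhile (fun x => x ≠ '}')
      let rest' := (cs.dropWhile (fun x => x ≠ '}')).drop 1
      pvBGo (PySem.Chars.lstrip rest')
        (if tok.isEmpty then out else out ++ [String.ofList tok])
    else
      let tok := (c :: cs).takeWhile (fun x => !PySem.Chars.isspace x)
      let rest' := (c :: cs).dropWhile (fun x => !PySem.Chars.isspace x)
      pvBGo (PySem.Chars.lstrip rest')
        (if tok.isEmpty then out else out ++ [String.ofList tok])
termination_by rest.length
decreasing_by
  · exact pvDecB1 c cs
  · exact pvDecB2 c cs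

def parse_dnd_data_py_alt (s : String) : List String :=
  pvBGo (PySem.Chars.lstrip s.toList) []

-- ===== PRECONDITION & SPEC =====
def Spec_parse_dnd_data_py (s : String) (out : List String) : Prop := out = parse_dnd_data_py_alt s
instance (s : String) (out : List String) : Decidable (Spec_parse_dnd_data_py s out) := by unfold Spec_parse_dnd_data_py; infer_instance

-- ===== CLAIM (what is proved, stated in full; the proofs are below) =====
def Claim_equal_parse_dnd_data_py : Prop := ∀ (s : String), Dom_parse_dnd_data_py s → Spec_parse_dnd_data_py s (parse_dnd_data_py s)

-- ===== LEMMAS AND PROOFS =====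

-- one unfolding step of pvBGo for each branch
theorem pvBGo_brace (cs : List Char) (out : List String) :
    pvBGo ('{' :: cs) out =
      pvBGo (PySem.Chars.lstrip ((cs.dropWhile (fun x => x ≠ '}')).drop 1))
        (if (cs.takeWhile (fun x => x ≠ '}')).isEmpty then out
         else out ++ [String.ofList (cs.takeWhile (fun x => x ≠ '}'))]) := by
  rw [pvBGo, if_pos rfl]

theorem pvBGo_tok (c : Char) (cs : List Char) (out : List String) (hc : ¬ c = '{') :
    pvBGo (c :: cs) out =
      pvBGo (PySem.Chars.lstrip ((c :: cs).dropWhile (fun x => !PySem.Chars.isspace x)))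
        (if ((c :: cs).takeWhile (fun x => !PySem.Chars.isspace x)).isEmpty then out
         else out ++ [String.ofList ((c :: cs).takeWhile (fun x => !PySem.Chars.isspace x))]) := by
  rw [pvBGo, if_neg hc]

-- the accumulator of pvBGo factors out
theorem pvBGo_acc (rest : List Char) (out : List String) :
    pvBGo rest out = out ++ pvBGo rest [] := by
  suffices H : ∀ n (rest : List Char), rest.length ≤ n → ∀ out,
      pvBGo rest out = out ++ pvBGo rest [] from H rest.length rest le_rfl out
  intro n
  induction n with
  | zero =>
    intro rest hlen out
    have : rest = [] := by
      cases rest with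
      | nil => rfl
      | cons a t => simp at hlen
    subst this; simp [pvBGo]
  | succ n ih =>
    intro rest hlen out
    match rest with
    | [] => simp [pvBGo]
    | c :: cs =>
      have hcs : cs.length ≤ n := by simp at hlen; omega
      by_cases hc : c = '{'
      · subst hc
        rw [pvBGo_brace, pvBGo_brace]
        by_cases h : (cs.takeWhile (fun x => x ≠ '}')).isEmpty = true
        · rw [if_pos h, if_pos h]
          exact ih _ (le_trans (pvLenBrace cs) hcs) out
        · rw [if_neg h, if_neg h,
              ih _ (le_trans (pvLenBrace cs) hcs)
                (out ++ [String.ofList (cs.takeWhile (fun x => x ≠ '}'))]),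
              ih _ (le_trans (pvLenBrace cs) hcs)
                ([] ++ [String.ofList (cs.takeWhile (fun x => x ≠ '}'))])]
          simp
      · rw [pvBGo_tok c cs _ hc, pvBGo_tok c cs _ hc]
        by_cases h : ((c :: cs).takeWhile (fun x => !PySem.Chars.isspace x)).isEmpty = true
        · rw [if_pos h, if_pos h]
          exact ih _ (le_trans (pvLenTok c cs) hcs) out
        · rw [if_neg h, if_neg h,
              ih _ (le_trans (pvLenTok c cs) hcs)
                (out ++ [String.ofList ((c :: cs).takeWhile (fun x => !PySem.Chars.isspace x))]),
              ih _ (le_trans (pvLenTok c cs) hcs)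
                ([] ++ [String.ofList ((c :: cs).takeWhile (fun x => !PySem.Chars.isspace x))])]
          simp

-- A's inner scan ends where takeWhile-not-space ends
theorem pvAScan_spec (cs : List Char) (i : Nat) :
    pvAScan cs i = i + ((cs.drop i).takeWhile (fun x => !PySem.Chars.isspace x)).length := by
  fun_induction pvAScan with
  | case1 j h ih =>
    obtain ⟨hlt, hsp⟩ := h
    rw [List.drop_eq_getElem_cons hlt, List.takeWhile_cons]
    rw [List.getD_eq_getElem _ ' ' hlt] at hsp
    simp only [Bool.not_eq_true] at hsp
    simp [hsp]
    omega
  | case2 j h =>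
    by_cases hlt : j < cs.length
    · have hsp : PySem.Chars.isspace (cs.getD j ' ') := by tauto
      rw [List.drop_eq_getElem_cons hlt, List.takeWhile_cons]
      rw [List.getD_eq_getElem _ ' ' hlt] at hsp
      simp [hsp]
    · rw [List.drop_eq_nil_of_le (by omega)]; simp

-- span characterization: if p holds before m and fails at m, takeWhile/dropWhile split at m
theorem pvSpanAt (p : Char → Bool) (l : List Char) (m : Nat) (hm : m < l.length)
    (hstop : p l[m] = false)
    (hmin : ∀ k, (hk : k < m) → p (l[k]'(by omega)) = true) :
    l.takeWhile p = l.take m ∧ l.dropWhile p = l.drop m := by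
  induction l generalizing m with
  | nil => simp at hm
  | cons a t ih =>
    cases m with
    | zero =>
      simp only [List.getElem_cons_zero] at hstop
      simp [hstop]
    | succ m' =>
      have ha : p a = true := by
        have := hmin 0 (by omega)
        simpa using this
      have hrec := ih m' (by simpa using hm) (by simpa using hstop)
        (fun k hk => by have := hmin (k + 1) (by omega); simpa using this)
      rw [List.takeWhile_cons, List.dropWhile_cons]
      simp only [ha, if_true]
      exact ⟨by rw [hrec.1]; rfl, by rw [hrec.2]; rfl⟩

theorem pvSingletonInfix {c : Char} {l : List Char} : [c] <:+: l ↔ c ∈ l := by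
  constructor
  · intro h
    exact List.singleton_sublist.mp (List.IsInfix.sublist h)
  · intro h
    obtain ⟨s, t, rfl⟩ := List.append_of_mem h
    exact ⟨s, t, by simp⟩

theorem pvSingletonPrefixDrop {c : Char} {cs : List Char} {k : Nat} (hk : k < cs.length) :
    ([c] <+: cs.drop k) ↔ cs[k] = c := by
  rw [List.drop_eq_getElem_cons hk, List.cons_prefix_cons]
  constructor
  · rintro ⟨h1, -⟩
    exact h1.symm
  · intro h
    exact ⟨h.symm, List.nil_prefix⟩

theorem pvDropWhileEqDrop (p : Char → Bool) (l : List Char) :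
    l.dropWhile p = l.drop (l.takeWhile p).length := by
  induction l with
  | nil => simp
  | cons a t ih =>
    by_cases h : p a <;> simp [h, ih]


theorem pvBeqEmpty (l : List Char) : (String.ofList l == "") = l.isEmpty := by
  cases l with
  | nil => decide
  | cons a t => simp [String.ext_iff]

theorem pvLstripKeep (c : Char) (cs : List Char) (h : PySem.Chars.isspace c = false) :
    PySem.Chars.lstrip (c :: cs) = c :: cs := by
  simp [PySem.Chars.lstrip, h]

theorem pvLstripSkip (c : Char) (cs : List Char) (h : PySem.Chars.isspace c = true) :
    PySem.Chars.lstrip (c :: cs) = PySem.Chars.lstrip cs := by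
  simp [PySem.Chars.lstrip, h]

theorem pvTakeWhileAll (p : Char → Bool) (l : List Char) (h : ∀ a ∈ l, p a = true) :
    l.takeWhile p = l ∧ l.dropWhile p = [] := by
  induction l with
  | nil => simp
  | cons a t ih =>
    have ha : p a = true := h a (by simp)
    have := ih (fun b hb => h b (by simp [hb]))
    simp [ha, this.1, this.2]

-- main invariant: A's tokens from position i, filtered, are B's loop on the lstripped suffix
theorem pvMain (cs : List Char) (i : Nat) :
    (pvALoop cs i).filter (fun p => !(p == "")) =
      pvBGo (PySem.Chars.lstrip (cs.drop i)) [] := by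
  fun_induction pvALoop cs i with
  | case1 i hi ch hch j hj =>
    have hchd : ch = cs.getD i ' ' := rfl
    have hjd : j = PySem.Chars.findFrom cs ['}'] ((i : Int) + 1) := rfl
    clear_value ch j
    subst hchd
    have hgd : cs.getD i ' ' = cs[i] := List.getD_eq_getElem _ _ hi
    have hcb : cs[i] = '{' := by rw [← hgd]; exact hch
    have hcast : ((i : Int) + 1) = ((i + 1 : Nat) : Int) := by push_cast; ring
    have hnotin : '}' ∉ cs.drop (i + 1) := by
      have hno := (PySem.Chars.findFrom_natCast_eq_neg_one_iff cs ['}'] (i + 1)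
        (by omega)).mp (by rw [← hcast, ← hjd]; exact hj)
      intro hm
      exact hno (pvSingletonInfix.mpr hm)
    have hall := pvTakeWhileAll (fun x => x ≠ '}') (cs.drop (i + 1))
      (fun a ha => by simp; intro he; exact hnotin (he ▸ ha))
    rw [List.drop_eq_getElem_cons hi, hcb, pvLstripKeep _ _ (by decide), pvBGo,
      if_pos rfl]
    simp only [hall.1, hall.2, List.drop_nil]
    have hln : PySem.Chars.lstrip ([] : List Char) = [] := by decide
    rw [hln, pvBGo, List.filter_cons, pvBeqEmpty]
    cases he : (cs.drop (i + 1)).isEmpty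
    · simp
    · simp [he]
  | case2 i hi ch hch j hj ih =>
    have hchd : ch = cs.getD i ' ' := rfl
    have hjd : j = PySem.Chars.findFrom cs ['}'] ((i : Int) + 1) := rfl
    clear_value ch j
    subst hchd
    have hgd : cs.getD i ' ' = cs[i] := List.getD_eq_getElem _ _ hi
    have hcb : cs[i] = '{' := by rw [← hgd]; exact hch
    have hcast : ((i : Int) + 1) = ((i + 1 : Nat) : Int) := by push_cast; ring
    have hspec := PySem.Chars.findFrom_natCast_spec cs ['}'] (i + 1) (by omega)
      (by rw [← hcast, ← hjd]; exact hj)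
    rw [← hcast, ← hjd] at hspec
    obtain ⟨hge, hpre, hmin⟩ := hspec
    have hJlt : j.toNat < cs.length := by
      by_contra hge'
      rw [List.drop_eq_nil_of_le (by omega)] at hpre
      simp at hpre
    have hJge : i + 1 ≤ j.toNat := by omega
    have hJc : cs[j.toNat] = '}' := (pvSingletonPrefixDrop hJlt).mp hpre
    have hml : j.toNat - (i + 1) < (cs.drop (i + 1)).length := by
      simp [List.length_drop]; omega
    have hstop : (fun x => decide (x ≠ '}')) ((cs.drop (i + 1))[j.toNat - (i + 1)]'hml) = false := by
      have hx : (cs.drop (i + 1))[j.toNat - (i + 1)]'hml = cs[j.toNat] := by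
        rw [List.getElem_drop]
        congr 1
        omega
      rw [hx, hJc]
      simp
    have hminp : ∀ k, (hk : k < j.toNat - (i + 1)) →
        (fun x => decide (x ≠ '}')) ((cs.drop (i + 1))[k]'(by omega)) = true := by
      intro k hk
      have hke : (cs.drop (i + 1))[k]'(by omega) = cs[i + 1 + k]'(by omega) := by
        rw [List.getElem_drop]
      have hne : cs[i + 1 + k]'(by omega) ≠ '}' := by
        intro he
        exact hmin (i + 1 + k) (by omega) (by omega)
          ((pvSingletonPrefixDrop (by omega)).mpr he)
      rw [hke]
      simpa using hne
    have hspan := pvSpanAt (fun x => decide (x ≠ '}')) (cs.drop (i + 1))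
      (j.toNat - (i + 1)) hml hstop hminp
    have h0a : (0 : Int) ≤ (i : Int) + 1 := by omega
    have h0b : (0 : Int) ≤ j := by omega
    have hslice : PySem.Chars.slice cs (some ((i : Int) + 1)) (some j) =
        (cs.drop (i + 1)).take (j.toNat - (i + 1)) := by
      rw [PySem.Chars.slice_eq_listSlice, PySem.List.slice_toNat cs h0a h0b]
      have h1 : ((i : Int) + 1).toNat = i + 1 := by omega
      rw [h1]
    have hrest : ((cs.drop (i + 1)).dropWhile (fun x => decide (x ≠ '}'))).drop 1 =
        cs.drop (j.toNat + 1) := by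
      rw [hspan.2, List.drop_drop, List.drop_drop]
      congr 1
      omega
    rw [List.drop_eq_getElem_cons hi, hcb, pvLstripKeep _ _ (by decide), pvBGo,
      if_pos rfl]
    simp only [hspan.1, hrest, hslice]
    rw [pvBGo_acc, List.filter_cons, pvBeqEmpty, ih]
    cases he : ((cs.drop (i + 1)).take (j.toNat - (i + 1))).isEmpty
    · simp
    · simp [he]
  | case3 i hi ch hnb hsp ih =>
    have hchd : ch = cs.getD i ' ' := rfl
    clear_value ch
    subst hchd
    have hgd : cs.getD i ' ' = cs[i] := List.getD_eq_getElem _ _ hi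
    have hsp' : PySem.Chars.isspace cs[i] = true := by rw [← hgd]; exact hsp
    rw [List.drop_eq_getElem_cons hi, pvLstripSkip _ _ hsp']
    exact ih
  | case4 i hi ch hnb hsp j ih =>
    have hchd : ch = cs.getD i ' ' := rfl
    have hjd : j = pvAScan cs i := rfl
    clear_value ch j
    subst hchd hjd
    have hgd : cs.getD i ' ' = cs[i] := List.getD_eq_getElem _ _ hi
    have hsp' : PySem.Chars.isspace cs[i] = false := by
      rw [← hgd]; simpa using hsp
    have hcb : cs[i] ≠ '{' := by rw [← hgd]; exact hnb
    have hscan : pvAScan cs i = i + ((cs.drop i).takeWhile (fun x => !PySem.Chars.isspace x)).length :=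
      pvAScan_spec cs i
    have h0a : (0 : Int) ≤ ((i : Nat) : Int) := by omega
    have h0b : (0 : Int) ≤ ((pvAScan cs i : Nat) : Int) := by omega
    have hslice : PySem.Chars.slice cs (some (i : Int)) (some ((pvAScan cs i : Nat) : Int)) =
        (cs.drop i).takeWhile (fun x => !PySem.Chars.isspace x) := by
      rw [PySem.Chars.slice_eq_listSlice, PySem.List.slice_toNat cs h0a h0b]
      have h1 : ((pvAScan cs i : Nat) : Int).toNat - ((i : Nat) : Int).toNat =
          ((cs.drop i).takeWhile (fun x => !PySem.Chars.isspace x)).length := by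
        simp only [Int.toNat_natCast]
        omega
      have h2 : ((i : Nat) : Int).toNat = i := by omega
      rw [h2] at h1 ⊢
      rw [h1]
      exact (List.prefix_iff_eq_take.mp (List.takeWhile_prefix _)).symm
    have hdw : (cs.drop i).dropWhile (fun x => !PySem.Chars.isspace x) = cs.drop (pvAScan cs i) := by
      rw [pvDropWhileEqDrop, List.drop_drop, hscan]
    have hcons : cs.drop i = cs[i] :: cs.drop (i + 1) := List.drop_eq_getElem_cons hi
    have htokne : ((cs.drop i).takeWhile (fun x => !PySem.Chars.isspace x)).isEmpty = false := by
      rw [hcons, List.takeWhile_cons]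
      simp [hsp']
    rw [hslice]
    conv_rhs => rw [hcons]
    have hR1 : PySem.Chars.lstrip (cs[i] :: cs.drop (i + 1)) = cs[i] :: cs.drop (i + 1) :=
      pvLstripKeep _ _ hsp'
    rw [hR1, pvBGo, if_neg hcb]
    conv_rhs => rw [← hcons]
    simp only [hdw, htokne, Bool.false_eq_true, if_false]
    rw [pvBGo_acc, List.filter_cons, pvBeqEmpty, htokne, ih]
    simp
  | case5 i hi =>
    have hnil : cs.drop i = [] := List.drop_eq_nil_of_le (by omega)
    rw [hnil]
    have hln : PySem.Chars.lstrip ([] : List Char) = [] := by decide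
    rw [hln, pvBGo]
    simp

-- ===== VERDICT (by name: the statement is the Claim_ definition above) =====
theorem parse_dnd_data_py_spec : Claim_equal_parse_dnd_data_py := by
  intro s _
  unfold Spec_parse_dnd_data_py parse_dnd_data_py parse_dnd_data_py_alt
  simpa using pvMain s.toList 0
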